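-- pv_equiv track=rewrite | github.com/alea-institute/legal-sentence-demo | app/main.py | generate_length_distribution
-- ===== SOURCE A (Python) =====
-- from typing import List, Optional, Dict, Any
-- from collections import defaultdict
--
-- def generate_length_distribution(results: Dict[str, Any]) -> Dict[str, Any]:
--     """Generate data for visualizing sentence length distribution."""
--     distribution_data = {}
--
--     for name, result in results.items():
--         # Calculate sentence lengths
--         sentence_lengths = [len(s) for s in result["sentences"]]
--
--         if not sentence_lengths:
--             distribution_data[name] = []
--             continue
--
--         # Create histogram data - divide into 10 bins
--         min_length = min(sentence_lengths)
--         max_length = max(sentence_lengths)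
--
--         # Ensure reasonable bin size
--         bin_size = max(10, (max_length - min_length) // 10)
--
--         # Create bins and count sentences in each bin
--         bins = defaultdict(int)
--         for length in sentence_lengths:
--             bin_index = (length - min_length) // bin_size
--             bins[bin_index] += 1
--
--         # Find the maximum count for normalization
--         max_count = max(bins.values()) if bins else 1
--
--         # Convert to sorted list of {length, count} for template
--         distribution = []
--         for bin_idx, count in sorted(bins.items()):
--             # Calculate normalized percentage (for more visible differences)
--             normalized_percentage = round((count / max_count) * 100)
--
--             # Ensure small values are still visible
--             display_percentage = max(5, normalized_percentage) if count > 0 else 0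
--
--             distribution.append({
--                 "min_length": min_length + (bin_idx * bin_size),
--                 "max_length": min_length + ((bin_idx + 1) * bin_size) - 1,
--                 "count": count,
--                 "percentage": display_percentage,  # Normalized percentage for bar width
--                 "actual_percentage": round((count / len(sentence_lengths)) * 100)  # Actual percentage for label
--             })
--
--         distribution_data[name] = distribution
--
--     return distribution_data
-- ===== SOURCE B (Python) =====
-- from itertools import groupby
--
--
-- def generate_length_distribution(results):
--     """Generate data for visualizing sentence length distribution."""
--     distribution_data = {}
--
--     for name, result in results.items():
--         # Sort the lengths once; grouping by bin index then needs no hashing pass.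
--         sentence_lengths = sorted(len(s) for s in result["sentences"])
--
--         if not sentence_lengths:
--             distribution_data[name] = []
--             continue
--
--         min_length = sentence_lengths[0]
--         max_length = sentence_lengths[-1]
--         bin_size = max(10, (max_length - min_length) // 10)
--
--         # Consecutive runs of equal bin index are exactly the non-empty bins,
--         # already in ascending order.
--         groups = [
--             (bin_idx, sum(1 for _ in grp))
--             for bin_idx, grp in groupby(
--                 sentence_lengths, key=lambda L: (L - min_length) // bin_size
--             )
--         ]
--
--         max_count = max(count for _, count in groups)
--         total = len(sentence_lengths)
--
--         distribution_data[name] = [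
--             {
--                 "min_length": min_length + bin_idx * bin_size,
--                 "max_length": min_length + (bin_idx + 1) * bin_size - 1,
--                 "count": count,
--                 "percentage": max(5, round((count / max_count) * 100)) if count > 0 else 0,
--                 "actual_percentage": round((count / total) * 100),
--             }
--             for bin_idx, count in groups
--         ]
--
--     return distribution_data
-- ===== Notes on version B (the rewrite author's own statement) =====
-- stated objective: alternative
-- what changed: Replaces A's defaultdict histogram plus sorted(bins.items()) pass by sorting the sentence lengths once and counting consecutive runs of equal bin index (itertools.groupby), which yields the non-empty bins already in ascending order.
import Mathlib
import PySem

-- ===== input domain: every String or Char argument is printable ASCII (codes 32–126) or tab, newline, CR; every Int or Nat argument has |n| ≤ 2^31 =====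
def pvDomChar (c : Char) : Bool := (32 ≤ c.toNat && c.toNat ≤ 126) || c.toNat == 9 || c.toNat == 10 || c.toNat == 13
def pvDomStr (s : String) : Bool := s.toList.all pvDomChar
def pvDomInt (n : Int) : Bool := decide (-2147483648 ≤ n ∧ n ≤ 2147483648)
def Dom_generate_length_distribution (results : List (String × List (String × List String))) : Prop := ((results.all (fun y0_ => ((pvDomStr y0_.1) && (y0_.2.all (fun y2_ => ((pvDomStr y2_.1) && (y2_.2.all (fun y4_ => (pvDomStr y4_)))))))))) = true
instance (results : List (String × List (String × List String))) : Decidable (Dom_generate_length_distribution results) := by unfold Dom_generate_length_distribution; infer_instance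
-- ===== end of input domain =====

-- B replaces A's defaultdict-histogram + sorted(items) pass by one sort of the lengths and a
-- groupby-style run scan (alternative decomposition; same asymptotic cost).

-- ===== PORT A =====

-- Exact emulation of CPython's round((c/m)*100) on positive ints c, m (both Pythons compute
-- this float expression identically): round a positive rational to the nearest IEEE double
-- (ties to even), multiply by 100 with a second rounding, then round half-to-even to an int.
def rndHalfEven (N d : Nat) : Nat :=
  let q := N / d
  let r := N % d
  if d < 2 * r then q + 1 else if 2 * r < d then q else if q % 2 = 0 then q else q + 1

-- nearest double for n/d (n, d > 0): value = m * 2^e / 2^52  (Nat.log2 q = q.bit_length()-1)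
def floatOfRat (n d : Nat) : Nat × Int :=
  let q := (n <<< 200) / d
  let e : Int := (Nat.log2 q : Int) - 200
  (rndHalfEven (n <<< ((52 : Int) - e).toNat) d, e)

def pyRound100Div (c m : Nat) : Int :=
  let p1 := floatOfRat c m
  let nd : Nat × Nat :=
    if 0 ≤ p1.2 then (100 * p1.1 * 2 ^ p1.2.toNat, 2 ^ 52)
    else (100 * p1.1, 2 ^ (52 + (-p1.2).toNat))
  let p2 := floatOfRat nd.1 nd.2
  ((rndHalfEven p2.1 (2 ^ ((52 : Int) - p2.2).toNat) : Nat) : Int)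

-- per-name body of A's loop (Python min/max on a nonempty list never raise: total .getD form;
-- sorted(bins.items()) compares pairs whose first components are distinct, so it is the sort by key)
def distRowsA (sentences : List String) : List (List (String × Int)) :=
  let sentence_lengths := sentences.map PySem.Str.len
  if sentence_lengths = [] then []
  else
    let min_length := (PySem.List.min? sentence_lengths (fun x => x)).getD 0
    let max_length := (PySem.List.max? sentence_lengths (fun x => x)).getD 0
    let bin_size := max 10 (PySem.Int.floordiv (max_length - min_length) 10)
    let bins := sentence_lengths.foldl
      (fun d length => d.modify (PySem.Int.floordiv (length - min_length) bin_size) 0 (· + 1))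
      (PySem.Dict.empty : PySem.Dict Int Int)
    let max_count := if bins.items ≠ [] then PySem.List.maxD bins.values (fun x => x) 0 else 1
    (PySem.List.sorted bins.items (fun p => p.1)).foldl
      (fun distribution p =>
        let normalized_percentage := pyRound100Div p.2.toNat max_count.toNat
        let display_percentage := if p.2 > 0 then max 5 normalized_percentage else 0
        distribution ++
          [[("min_length", min_length + p.1 * bin_size),
            ("max_length", min_length + (p.1 + 1) * bin_size - 1),
            ("count", p.2),
            ("percentage", display_percentage),
            ("actual_percentage", pyRound100Div p.2.toNat sentence_lengths.length)]]) []

-- result["sentences"]: KeyError (get? = none) excluded by Pre_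
def generate_length_distribution (results : List (String × List (String × List String))) : List (String × List (List (String × Int))) :=
  ((PySem.Dict.ofList results).items.foldl
    (fun distribution_data p =>
      distribution_data.insert p.1
        (distRowsA (((PySem.Dict.ofList p.2).get? "sentences").getD [])))
    (PySem.Dict.empty : PySem.Dict String (List (List (String × Int))))).items

-- ===== PORT B =====

-- itertools.groupby + len of each group: consecutive runs of equal key, with their sizes
def runsB (key : Int → Int) : List Int → List (Int × Int)
  | [] => []
  | l :: t =>
      (key l, (1 : Int) + (t.takeWhile (fun x => key x == key l)).length) ::
        runsB key (t.dropWhile (fun x => key x == key l))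
termination_by sl => sl.length
decreasing_by simpa using Nat.lt_succ_of_le (List.length_dropWhile_le _ t)

-- per-name body of B's loop (max over the nonempty group counts: total maxD form)
def distRowsB (sentences : List String) : List (List (String × Int)) :=
  let sentence_lengths := PySem.List.sorted (sentences.map PySem.Str.len) (fun x => x)
  if sentence_lengths = [] then []
  else
    let min_length := PySem.List.pyGetD sentence_lengths 0 0
    let max_length := PySem.List.pyGetD sentence_lengths (-1) 0
    let bin_size := max 10 (PySem.Int.floordiv (max_length - min_length) 10)
    let groups := runsB (fun L => PySem.Int.floordiv (L - min_length) bin_size) sentence_lengths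
    let max_count := PySem.List.maxD (groups.map (fun p => p.2)) (fun x => x) 0
    groups.map (fun p =>
      [("min_length", min_length + p.1 * bin_size),
       ("max_length", min_length + (p.1 + 1) * bin_size - 1),
       ("count", p.2),
       ("percentage", if p.2 > 0 then max 5 (pyRound100Div p.2.toNat max_count.toNat) else 0),
       ("actual_percentage", pyRound100Div p.2.toNat sentence_lengths.length)])

def generate_length_distribution_alt (results : List (String × List (String × List String))) : List (String × List (List (String × Int))) :=
  ((PySem.Dict.ofList results).items.foldl
    (fun distribution_data p =>
      distribution_data.insert p.1
        (distRowsB (((PySem.Dict.ofList p.2).get? "sentences").getD [])))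
    (PySem.Dict.empty : PySem.Dict String (List (List (String × Int))))).items

-- ===== PRECONDITION & SPEC =====
-- Pre_ excludes exactly the inputs on which A raises KeyError: some surviving entry of the
-- results dict lacks the "sentences" key.
def Pre_generate_length_distribution (results : List (String × List (String × List String))) : Prop :=
  ∀ p ∈ (PySem.Dict.ofList results).items, "sentences" ∈ p.2.map Prod.fst
instance (results : List (String × List (String × List String))) : Decidable (Pre_generate_length_distribution results) := by unfold Pre_generate_length_distribution; infer_instance

def pvWitness_generate_length_distribution : (List (String × List (String × List String))) :=
  [("a", [("sentences", ["ab", "c"])])]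

def Spec_generate_length_distribution (results : List (String × List (String × List String))) (out : List (String × List (List (String × Int)))) : Prop := out = generate_length_distribution_alt results
instance (results : List (String × List (String × List String))) (out : List (String × List (List (String × Int)))) : Decidable (Spec_generate_length_distribution results out) := by unfold Spec_generate_length_distribution; infer_instance

-- ===== CLAIM (what is proved, stated in full; the proofs are below) =====
def Claim_equal_generate_length_distribution : Prop := ∀ (results : List (String × List (String × List String))), Dom_generate_length_distribution results → Pre_generate_length_distribution results → Spec_generate_length_distribution results (generate_length_distribution results)

-- ===== LEMMAS AND PROOFS =====

lemma pairwise_le_getLast : ∀ {l : List Int} (h : l ≠ []), l.Pairwise (· ≤ ·) → ∀ y ∈ l, y ≤ l.getLast h := by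
  intro l
  induction l with
  | nil => simp
  | cons a t ih =>
    intro _ hp y hy
    rcases List.pairwise_cons.mp hp with ⟨ha, hpt⟩
    rcases eq_or_ne t ([] : List Int) with rfl | ht
    · simp at hy; simp [hy]
    · rw [List.getLast_cons ht]
      rcases List.mem_cons.mp hy with rfl | hyt
      · exact ha _ (List.getLast_mem ht)
      · exact ih ht hpt y hyt

lemma dropWhile_sorted_gt (k0 : Int) : ∀ (kt : List Int), (∀ m ∈ kt, k0 ≤ m) → kt.Pairwise (· ≤ ·) →
    ∀ m ∈ kt.dropWhile (· == k0), k0 < m := by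
  intro kt
  induction kt with
  | nil => simp
  | cons a t ih =>
    intro hall hp m hm
    rcases List.pairwise_cons.mp hp with ⟨ha, hpt⟩
    by_cases hak : a = k0
    · subst hak
      rw [List.dropWhile_cons_of_pos (by simp)] at hm
      exact ih (fun m hm => hall m (List.mem_cons_of_mem _ hm)) hpt m hm
    · rw [List.dropWhile_cons_of_neg (by simpa using hak)] at hm
      have hka : k0 < a := lt_of_le_of_ne (hall a (List.mem_cons_self)) (Ne.symm hak)
      rcases List.mem_cons.mp hm with rfl | hmt
      · exact hka
      · exact lt_of_lt_of_le hka (ha m hmt)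

lemma runs_keys (f : Int → Int) : ∀ (u : List Int) (p : Int × Int), p ∈ runsB f u → p.1 ∈ u.map f := by
  intro u
  induction u using runsB.induct f with
  | case1 => simp [runsB]
  | case2 l t ih =>
    intro p hp
    rw [runsB] at hp
    rcases List.mem_cons.mp hp with rfl | hp'
    · simp
    · have := ih p hp'
      rcases List.mem_map.mp this with ⟨x, hx, hfx⟩
      exact List.mem_map.mpr ⟨x, List.mem_cons_of_mem _ ((List.dropWhile_sublist _).mem hx), hfx⟩

lemma runs_pairwise (f : Int → Int) : ∀ (sl : List Int), ((sl.map f).Pairwise (· ≤ ·)) →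
    (runsB f sl).Pairwise (fun a b => a.1 < b.1) := by
  intro sl
  induction sl using runsB.induct f with
  | case1 => simp [runsB]
  | case2 l t ih =>
    intro hp
    rw [List.map_cons] at hp
    rcases List.pairwise_cons.mp hp with ⟨hall, hpt⟩
    have hmapdw : (t.dropWhile (fun x => f x == f l)).map f = (t.map f).dropWhile (· == f l) :=
      (List.dropWhile_map (f := f) (p := (· == f l)) (l := t)).symm
    rw [runsB]
    refine List.pairwise_cons.mpr ⟨?_, ?_⟩
    · intro p hp'
      have hk : p.1 ∈ (t.map f).dropWhile (· == f l) := by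
        rw [← hmapdw]; exact runs_keys f _ p hp'
      exact dropWhile_sorted_gt (f l) (t.map f) hall hpt p.1 hk
    · exact ih (by rw [hmapdw]; exact hpt.sublist (List.dropWhile_sublist _))

lemma runs_mem (f : Int → Int) : ∀ (sl : List Int), ((sl.map f).Pairwise (· ≤ ·)) →
    ∀ k c, ((k, c) ∈ runsB f sl ↔ (k ∈ sl.map f ∧ c = ((sl.map f).count k : Int))) := by
  intro sl
  induction sl using runsB.induct f with
  | case1 => simp [runsB]
  | case2 l t ih =>
    intro hp k c
    rw [List.map_cons] at hp
    rcases List.pairwise_cons.mp hp with ⟨hall, hpt⟩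
    have hmapdw : (t.dropWhile (fun x => f x == f l)).map f = (t.map f).dropWhile (· == f l) :=
      (List.dropWhile_map (f := f) (p := (· == f l)) (l := t)).symm
    have htwlen : (t.takeWhile (fun x => f x == f l)).length = ((t.map f).takeWhile (· == f l)).length := by
      rw [List.takeWhile_map, List.length_map]; simp [Function.comp_def]
    have htweq : ∀ m ∈ (t.map f).takeWhile (· == f l), m = f l := by
      intro m hm
      simpa using List.mem_takeWhile_imp hm
    have hdwgt : ∀ m ∈ (t.map f).dropWhile (· == f l), f l < m :=
      dropWhile_sorted_gt (f l) (t.map f) hall hpt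
    have hsplit : (t.map f).takeWhile (· == f l) ++ (t.map f).dropWhile (· == f l) = t.map f :=
      List.takeWhile_append_dropWhile
    have hcnt_dw0 : ((t.map f).dropWhile (· == f l)).count (f l) = 0 :=
      List.count_eq_zero.mpr (fun h => lt_irrefl _ (hdwgt _ h))
    have h1 : (t.map f).count (f l) = ((t.map f).takeWhile (· == f l)).length := by
      conv_lhs => rw [← hsplit]
      rw [List.count_append, List.count_eq_length.mpr (fun b hb => by simp [htweq b hb]), hcnt_dw0]
      omega
    have hcnt_head : ((l :: t).map f).count (f l) = 1 + ((t.map f).takeWhile (· == f l)).length := by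
      rw [List.map_cons, List.count_cons_self, h1]
      omega
    have hcnt_rest : ∀ k', k' ≠ f l → ((l :: t).map f).count k' = ((t.map f).dropWhile (· == f l)).count k' := by
      intro k' hk'
      have h2 : (t.map f).count k' = ((t.map f).dropWhile (· == f l)).count k' := by
        conv_lhs => rw [← hsplit]
        rw [List.count_append, List.count_eq_zero.mpr (fun h => hk' (htweq _ h))]
        omega
      rw [List.map_cons, List.count_cons_of_ne (by simpa using hk'.symm), h2]
    constructor
    · intro hmem
      rw [runsB] at hmem
      rcases List.mem_cons.mp hmem with heq | hrec
      · have hk : k = f l := congrArg Prod.fst heq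
        have hc : c = (1 : Int) + ((t.takeWhile (fun x => f x == f l)).length : Int) := congrArg Prod.snd heq
        subst hk
        refine ⟨by simp, ?_⟩
        rw [hcnt_head, hc, htwlen]
        push_cast; ring
      · have := (ih (by rw [hmapdw]; exact hpt.sublist (List.dropWhile_sublist _)) k c).mp hrec
        rcases this with ⟨hkmem, hc⟩
        rw [hmapdw] at hkmem hc
        have hkgt : f l < k := hdwgt _ hkmem
        refine ⟨?_, ?_⟩
        · rw [List.map_cons]
          exact List.mem_cons_of_mem _ ((List.dropWhile_sublist _).mem hkmem)
        · rw [hcnt_rest k (by omega)]; exact hc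
    · rintro ⟨hkmem, hc⟩
      rw [runsB]
      by_cases hk : k = f l
      · subst hk
        apply List.mem_cons.mpr (Or.inl _)
        rw [hcnt_head] at hc
        have hcc : c = (1 : Int) + ((t.takeWhile (fun x => f x == f l)).length : Int) := by
          rw [hc, htwlen]; push_cast; ring
        rw [hcc]
      · apply List.mem_cons.mpr (Or.inr _)
        apply (ih (by rw [hmapdw]; exact hpt.sublist (List.dropWhile_sublist _)) k c).mpr
        rw [hmapdw]
        rw [List.map_cons] at hkmem
        have hkt : k ∈ t.map f := by
          rcases List.mem_cons.mp hkmem with h | h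
          · exact absurd h hk
          · exact h
        have hkdw : k ∈ (t.map f).dropWhile (· == f l) := by
          rcases List.mem_append.mp (by rw [hsplit]; exact hkt) with h | h
          · exact absurd (htweq _ h) hk
          · exact h
        exact ⟨hkdw, by rw [← hcnt_rest k hk]; exact hc⟩

lemma sorted_counter_eq_runs (f : Int → Int) (ls sl : List Int)
    (hperm : sl.Perm ls) (hsl : sl.Pairwise (· ≤ ·)) (hmono : ∀ a b, a ≤ b → f a ≤ f b) :
    PySem.List.sorted (PySem.Dict.counter (ls.map f)).items (fun p => p.1) = runsB f sl := by
  have hmap : (sl.map f).Pairwise (· ≤ ·) := List.pairwise_map.mpr (hsl.imp (fun h => hmono _ _ h))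
  have hpw := runs_pairwise f sl hmap
  apply PySem.List.sorted_eq_of_perm_of_pairwise_lt
  · have hnr : (runsB f sl).Nodup :=
      hpw.imp (fun {a b} h => fun he => absurd (congrArg Prod.fst he) (ne_of_lt h))
    have hni : (PySem.Dict.counter (ls.map f)).items.Nodup :=
      (PySem.Dict.nodup_keys_counter (ls.map f)).of_map
    apply (List.perm_ext_iff_of_nodup hnr hni).mpr
    rintro ⟨k, c⟩
    constructor
    · intro hr
      obtain ⟨hk, hc⟩ := (runs_mem f sl hmap k c).mp hr
      rw [PySem.Dict.items_counter]
      refine List.mem_map.mpr ⟨k, (PySem.Set.mem_ofList _ _).mpr ((hperm.map f).mem_iff.mp hk), ?_⟩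
      rw [hc, (hperm.map f).count_eq]
    · intro hi
      rw [PySem.Dict.items_counter] at hi
      obtain ⟨x, hx, hxe⟩ := List.mem_map.mp hi
      have hxk : x = k := congrArg Prod.fst hxe
      have hcc : c = ((ls.map f).count k : Int) := by
        have h2 := congrArg Prod.snd hxe
        simp only at h2
        rw [← h2, hxk]
      exact (runs_mem f sl hmap k c).mpr ⟨(hperm.map f).mem_iff.mpr ((PySem.Set.mem_ofList _ _).mp (hxk ▸ hx)),
        by rw [hcc, (hperm.map f).count_eq]⟩
  · exact hpw

lemma maxD_perm_int (xs ys : List Int) (h : xs.Perm ys) (hne : xs ≠ []) :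
    PySem.List.maxD xs (fun x => x) 0 = PySem.List.maxD ys (fun x => x) 0 := by
  have hyne : ys ≠ [] := fun he => hne (List.Perm.eq_nil (he ▸ h))
  apply le_antisymm
  · exact PySem.List.le_maxD_id ys 0 _ (h.mem_iff.mp (PySem.List.maxD_mem xs _ 0 hne))
  · exact PySem.List.le_maxD_id xs 0 _ (h.mem_iff.mpr (PySem.List.maxD_mem ys _ 0 hyne))

lemma minA_eq_head (ls : List Int) (h : ls ≠ []) :
    (PySem.List.min? ls (fun x => x)).getD 0 = PySem.List.pyGetD (PySem.List.sorted ls (fun x => x)) 0 0 := by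
  obtain ⟨a, t, hst⟩ : ∃ a t, PySem.List.sorted ls (fun x => x) = a :: t := by
    cases hs : PySem.List.sorted ls (fun x => x) with
    | nil => exact absurd ((PySem.List.sorted_eq_nil_iff ls _ false).mp hs) h
    | cons a t => exact ⟨a, t, rfl⟩
  rw [hst, PySem.List.pyGetD_zero_cons]
  cases hm : PySem.List.min? ls (fun x => x) with
  | none => exact absurd ((PySem.List.min?_eq_none_iff ls _).mp hm) h
  | some m =>
      have hmem : m ∈ ls := PySem.List.min?_mem hm
      have hmin : ∀ y ∈ ls, m ≤ y := PySem.List.min?_isMin hm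
      have hahd : a ∈ ls := (PySem.List.sorted_perm ls (fun x => x) false).mem_iff.mp (hst ▸ List.mem_cons_self)
      have h1 : a ≤ m := PySem.List.key_head_sorted_le ls (fun x => x) hst m hmem
      have h2 : m ≤ a := hmin a hahd
      simp; omega

lemma maxA_eq_last (ls : List Int) (h : ls ≠ []) :
    (PySem.List.max? ls (fun x => x)).getD 0 = PySem.List.pyGetD (PySem.List.sorted ls (fun x => x)) (-1) 0 := by
  have hsne : PySem.List.sorted ls (fun x => x) ≠ [] := by
    intro he; exact h ((PySem.List.sorted_eq_nil_iff ls _ false).mp he)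
  rw [PySem.List.pyGetD_neg_one _ _ hsne]
  cases hm : PySem.List.max? ls (fun x => x) with
  | none => exact absurd ((PySem.List.max?_eq_none_iff ls _).mp hm) h
  | some m =>
      have hmem : m ∈ ls := PySem.List.max?_mem hm
      have hmax : ∀ y ∈ ls, y ≤ m := PySem.List.max?_isMax hm
      have hl := List.getLast_mem hsne
      have hlm : (PySem.List.sorted ls (fun x => x)).getLast hsne ∈ ls :=
        (PySem.List.sorted_perm ls (fun x => x) false).mem_iff.mp hl
      have hmm : m ∈ PySem.List.sorted ls (fun x => x) :=
        (PySem.List.sorted_perm ls (fun x => x) false).mem_iff.mpr hmem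
      have h1 : m ≤ (PySem.List.sorted ls (fun x => x)).getLast hsne :=
        pairwise_le_getLast hsne (by simpa using PySem.List.sorted_pairwise ls (fun x => x)) m hmm
      have h2 : (PySem.List.sorted ls (fun x => x)).getLast hsne ≤ m := hmax _ hlm
      simp; omega

theorem dist_eq (sentences : List String) : distRowsA sentences = distRowsB sentences := by
  unfold distRowsA distRowsB
  by_cases h : sentences.map PySem.Str.len = []
  · have hsl : PySem.List.sorted (sentences.map PySem.Str.len) (fun x => x) = [] :=
      (PySem.List.sorted_eq_nil_iff _ _ _).mpr h
    simp [h, PySem.List.sorted_eq_nil_iff]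
  · have hslne : PySem.List.sorted (sentences.map PySem.Str.len) (fun x => x) ≠ [] :=
      fun he => h ((PySem.List.sorted_eq_nil_iff _ _ _).mp he)
    simp only [if_neg h, if_neg hslne]
    rw [← minA_eq_head _ h, ← maxA_eq_last _ h]
    set ls := sentences.map PySem.Str.len with hlsdef
    set sl := PySem.List.sorted ls (fun x => x) with hsldef
    set m := (PySem.List.min? ls (fun x => x)).getD 0 with hmdef
    set M := (PySem.List.max? ls (fun x => x)).getD 0 with hMdef
    set bsz := max 10 (PySem.Int.floordiv (M - m) 10) with hbszdef
    have hbszpos : (0 : Int) < bsz := lt_of_lt_of_le (by norm_num) (le_max_left _ _)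
    have hmono : ∀ a b : Int, a ≤ b → PySem.Int.floordiv (a - m) bsz ≤ PySem.Int.floordiv (b - m) bsz := by
      intro a b hab
      rw [PySem.Int.floordiv_eq_ediv_of_pos hbszpos, PySem.Int.floordiv_eq_ediv_of_pos hbszpos]
      exact Int.ediv_le_ediv hbszpos (by omega)
    have hbins : ls.foldl
        (fun d length => d.modify (PySem.Int.floordiv (length - m) bsz) 0 (· + 1))
        (PySem.Dict.empty : PySem.Dict Int Int)
        = PySem.Dict.counter (ls.map (fun L => PySem.Int.floordiv (L - m) bsz)) := by
      simp [PySem.Dict.counter_eq_foldl, List.foldl_map]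
    have hrun : PySem.List.sorted (PySem.Dict.counter (ls.map (fun L => PySem.Int.floordiv (L - m) bsz))).items (fun p => p.1)
        = runsB (fun L => PySem.Int.floordiv (L - m) bsz) sl :=
      sorted_counter_eq_runs _ ls sl (PySem.List.sorted_perm ls _ false)
        (by simpa using PySem.List.sorted_pairwise ls (fun x => x)) hmono
    rw [hbins, hrun]
    have hrne : runsB (fun L => PySem.Int.floordiv (L - m) bsz) sl ≠ [] := by
      cases hc : sl with
      | nil => exact absurd hc hslne
      | cons a t => rw [runsB]; simp
    have hitemsne : (PySem.Dict.counter (ls.map (fun L => PySem.Int.floordiv (L - m) bsz))).items ≠ [] := by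
      intro he
      rw [he] at hrun
      exact hrne (by simpa using hrun.symm)
    rw [if_pos hitemsne]
    have hperm_items : (PySem.Dict.counter (ls.map (fun L => PySem.Int.floordiv (L - m) bsz))).items.Perm
        (runsB (fun L => PySem.Int.floordiv (L - m) bsz) sl) := by
      rw [← hrun]
      exact (PySem.List.sorted_perm _ _ false).symm
    have hvne : (PySem.Dict.counter (ls.map (fun L => PySem.Int.floordiv (L - m) bsz))).values ≠ [] := by
      intro he
      exact hitemsne (by simpa [PySem.Dict.values] using congrArg List.length he)
    have hmc : PySem.List.maxD (PySem.Dict.counter (ls.map (fun L => PySem.Int.floordiv (L - m) bsz))).values (fun x => x) 0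
        = PySem.List.maxD ((runsB (fun L => PySem.Int.floordiv (L - m) bsz) sl).map (fun p => p.2)) (fun x => x) 0 :=
      maxD_perm_int _ _ (hperm_items.map _) hvne
    rw [hmc]
    rw [PySem.List.foldl_append_singleton_eq_map]
    have hlen : ls.length = sl.length := (PySem.List.length_sorted ls _ false).symm
    rw [hlen, List.nil_append]

-- ===== VERDICT (by name: the statement is the Claim_ definition above) =====
theorem generate_length_distribution_spec : Claim_equal_generate_length_distribution := by
  intro results _ _
  unfold Spec_generate_length_distribution generate_length_distribution generate_length_distribution_alt
  have : (fun (distribution_data : PySem.Dict String (List (List (String × Int)))) (p : String × List (String × List String)) =>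
      distribution_data.insert p.1 (distRowsA (((PySem.Dict.ofList p.2).get? "sentences").getD [])))
      = (fun distribution_data p =>
      distribution_data.insert p.1 (distRowsB (((PySem.Dict.ofList p.2).get? "sentences").getD []))) := by
    funext dd p
    rw [dist_eq]
  rw [this]
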